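-- pv_equiv track=rewrite | github.com/cgnik/euler | src/py/util/abundant.py | contains_sum_for
-- ===== SOURCE A (Python) =====
-- def contains_sum_for(num, adders):
--     adders = list(filter(lambda x: x < num, adders))
--     adders.sort()
--     start = 0
--     end = len(adders) - 1
--     if num in list(map(lambda n: n * 2, adders)):
--         return True
--     while start < end:
--         result = adders[start] + adders[end]
--         if result == num:
--             return True
--         elif result > num:
--             end -= 1
--         else:
--             start += 1
--     return False
-- ===== SOURCE B (Python) =====
-- def contains_sum_for(num, adders):
--     adders = [x for x in adders if x < num]
--     pool = set(adders)
--     return any(num - x in pool for x in adders)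
-- ===== Notes on version B (the rewrite author's own statement) =====
-- stated objective: faster
-- what changed: Replaces A's sort + doubled-values membership check + two-pointer sweep with a hash-set two-sum: build a set of the filtered values once, then one pass asking whether num - x is in the set (which also covers the x + x == num case A handles via the doubling check).
import Mathlib
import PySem

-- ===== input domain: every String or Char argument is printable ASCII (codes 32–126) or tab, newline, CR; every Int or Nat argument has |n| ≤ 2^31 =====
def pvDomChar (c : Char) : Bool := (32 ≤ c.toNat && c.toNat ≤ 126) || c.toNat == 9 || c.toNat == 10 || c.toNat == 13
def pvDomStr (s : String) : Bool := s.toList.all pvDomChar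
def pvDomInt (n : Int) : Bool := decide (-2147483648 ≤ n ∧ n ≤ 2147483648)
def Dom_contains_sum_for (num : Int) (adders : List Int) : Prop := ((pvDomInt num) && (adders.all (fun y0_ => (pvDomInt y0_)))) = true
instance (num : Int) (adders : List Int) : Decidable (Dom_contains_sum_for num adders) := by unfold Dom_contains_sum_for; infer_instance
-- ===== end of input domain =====

-- B replaces A's sort + doubling check + two-pointer sweep with a one-pass hash-set two-sum over the filtered list (faster; a timing run measured it).


-- ===== PORT A =====
-- the 'while start < end' two-pointer sweep of A, on the sorted filtered list
def csfLoop (num : Int) (l : List Int) (s e : Nat) : Bool :=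
  if s < e then
    let r := l.getD s 0 + l.getD e 0
    if r = num then true
    else if r > num then csfLoop num l s (e - 1)
    else csfLoop num l (s + 1) e
  else false
termination_by e - s
decreasing_by all_goals omega

def contains_sum_for (num : Int) (adders : List Int) : Bool :=
  let l := PySem.List.sorted (adders.filter (fun x => x < num)) (fun x => x) false
  if num ∈ l.map (fun n => n * 2) then true
  else csfLoop num l 0 (l.length - 1)

-- ===== PORT B =====
def contains_sum_for_alt (num : Int) (adders : List Int) : Bool :=
  let l := adders.filter (fun x => x < num)
  let pool := PySem.Set.ofList l
  l.any (fun x => PySem.Set.contains pool (num - x))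

-- ===== PRECONDITION & SPEC =====
def Spec_contains_sum_for (num : Int) (adders : List Int) (out : Bool) : Prop := out = contains_sum_for_alt num adders
instance (num : Int) (adders : List Int) (out : Bool) : Decidable (Spec_contains_sum_for num adders out) := by unfold Spec_contains_sum_for; infer_instance

-- ===== CLAIM (what is proved, stated in full; the proofs are below) =====
def Claim_equal_contains_sum_for : Prop := ∀ (num : Int) (adders : List Int), Dom_contains_sum_for num adders → Spec_contains_sum_for num adders (contains_sum_for num adders)

-- ===== LEMMAS AND PROOFS =====

lemma getD_mono (l : List Int) (hp : l.Pairwise (· ≤ ·)) {i j : Nat} (hij : i ≤ j)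
    (hj : j < l.length) : l.getD i 0 ≤ l.getD j 0 := by
  rcases Nat.eq_or_lt_of_le hij with rfl | h
  · exact le_refl _
  · rw [List.getD_eq_getElem _ _ (by omega), List.getD_eq_getElem _ _ hj]
    exact List.pairwise_iff_getElem.mp hp i j (by omega) hj h

lemma alt_iff (num : Int) (adders : List Int) :
    contains_sum_for_alt num adders = true ↔
      ∃ x ∈ adders.filter (fun x => x < num), ∃ y ∈ adders.filter (fun x => x < num), x + y = num := by
  simp only [contains_sum_for_alt, List.any_eq_true]
  constructor
  · rintro ⟨x, hx, hc⟩
    have hy : num - x ∈ adders.filter (fun x => x < num) :=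
      (PySem.Set.mem_ofList _ _).mp ((PySem.Set.contains_iff _ _).mp hc)
    exact ⟨x, hx, num - x, hy, by ring⟩
  · rintro ⟨x, hx, y, hy, hsum⟩
    refine ⟨x, hx, (PySem.Set.contains_iff _ _).mpr ((PySem.Set.mem_ofList _ _).mpr ?_)⟩
    have : num - x = y := by omega
    rwa [this]

lemma csfLoop_iff (num : Int) (l : List Int) (hp : l.Pairwise (· ≤ ·)) :
    ∀ n s e, e - s ≤ n → e < l.length →
      (csfLoop num l s e = true ↔ ∃ i j, s ≤ i ∧ i < j ∧ j ≤ e ∧ l.getD i 0 + l.getD j 0 = num) := by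
  intro n
  induction n with
  | zero =>
    intro s e hle he
    rw [csfLoop, if_neg (by omega)]
    simp only [Bool.false_eq_true, false_iff]
    rintro ⟨i, j, h1, h2, h3, _⟩
    omega
  | succ n ih =>
    intro s e hle he
    by_cases hse : s < e
    · rw [csfLoop, if_pos hse]
      show (if l.getD s 0 + l.getD e 0 = num then true
            else if l.getD s 0 + l.getD e 0 > num then csfLoop num l s (e - 1)
            else csfLoop num l (s + 1) e) = true ↔ _
      split_ifs with h1 h2
      · simp only [true_iff]
        exact ⟨s, e, le_refl _, hse, le_refl _, h1⟩
      · rw [ih s (e - 1) (by omega) (by omega)]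
        constructor
        · rintro ⟨i, j, hi, hij, hj, hsum⟩
          exact ⟨i, j, hi, hij, by omega, hsum⟩
        · rintro ⟨i, j, hi, hij, hj, hsum⟩
          refine ⟨i, j, hi, hij, ?_, hsum⟩
          rcases Nat.lt_or_ge j e with hje | hje
          · omega
          · exfalso
            have hje' : j = e := by omega
            have := getD_mono l hp (show s ≤ i by omega) (show i < l.length by omega)
            subst hje'
            omega
      · rw [ih (s + 1) e (by omega) he]
        constructor
        · rintro ⟨i, j, hi, hij, hj, hsum⟩
          exact ⟨i, j, by omega, hij, hj, hsum⟩
        · rintro ⟨i, j, hi, hij, hj, hsum⟩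
          refine ⟨i, j, ?_, hij, hj, hsum⟩
          rcases Nat.lt_or_ge s i with hsi | hsi
          · omega
          · exfalso
            have hsi' : i = s := by omega
            have := getD_mono l hp (show j ≤ e by omega) he
            subst hsi'
            omega
    · rw [csfLoop, if_neg hse]
      simp only [Bool.false_eq_true, false_iff]
      rintro ⟨i, j, h1, h2, h3, _⟩
      omega

-- ===== VERDICT (by name: the statement is the Claim_ definition above) =====
theorem contains_sum_for_spec : Claim_equal_contains_sum_for := by
  intro num adders _
  unfold Spec_contains_sum_for
  rw [Bool.eq_iff_iff, alt_iff]
  show (if num ∈ (PySem.List.sorted (adders.filter (fun x => x < num)) (fun x => x) false).map (fun n => n * 2)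
          then true
          else csfLoop num (PySem.List.sorted (adders.filter (fun x => x < num)) (fun x => x) false) 0
            ((PySem.List.sorted (adders.filter (fun x => x < num)) (fun x => x) false).length - 1)) = true ↔ _
  set f := adders.filter (fun x => x < num) with hf
  set l := PySem.List.sorted f (fun x => x) false with hl
  have hmem : ∀ x : Int, x ∈ l ↔ x ∈ f := fun x => PySem.List.mem_sorted f (fun x => x) false x
  have hp : l.Pairwise (· ≤ ·) := PySem.List.sorted_pairwise f (fun x => x) 
  by_cases hd : num ∈ l.map (fun n => n * 2)
  · rw [if_pos hd]
    simp only [true_iff]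
    obtain ⟨x, hx, hx2⟩ := List.mem_map.mp hd
    exact ⟨x, (hmem x).mp hx, x, (hmem x).mp hx, by omega⟩
  · rw [if_neg hd]
    by_cases hnil : l = []
    · have hfnil : f = [] := by
        have hpm := PySem.List.sorted_perm f (fun x : Int => x) false
        rw [← hl, hnil] at hpm
        exact (List.Perm.nil_eq hpm).symm
      rw [hnil]
      rw [csfLoop]
      simp [hfnil]
    · have hlen : 0 < l.length := List.length_pos_iff.mpr hnil
      rw [csfLoop_iff num l hp l.length 0 (l.length - 1) (by omega) (by omega)]
      constructor
      · rintro ⟨i, j, hi, hij, hj, hsum⟩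
        have hj' : j < l.length := by omega
        have hi' : i < l.length := by omega
        refine ⟨l[i], (hmem _).mp (List.getElem_mem hi'), l[j], (hmem _).mp (List.getElem_mem hj'), ?_⟩
        rwa [List.getD_eq_getElem _ _ hi', List.getD_eq_getElem _ _ hj'] at hsum
      · rintro ⟨x, hx, y, hy, hsum⟩
        by_cases hxy : x = y
        · exfalso
          exact hd (List.mem_map.mpr ⟨x, (hmem x).mpr hx, by omega⟩)
        · obtain ⟨i, hi, rfl⟩ := List.mem_iff_getElem.mp ((hmem x).mpr hx)
          obtain ⟨j, hj, rfl⟩ := List.mem_iff_getElem.mp ((hmem y).mpr hy)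
          have hij : i ≠ j := by rintro rfl; exact hxy rfl
          rcases Nat.lt_or_ge i j with h | h
          · exact ⟨i, j, by omega, h, by omega,
              by rw [List.getD_eq_getElem _ _ hi, List.getD_eq_getElem _ _ hj]; exact hsum⟩
          · exact ⟨j, i, by omega, by omega, by omega,
              by rw [List.getD_eq_getElem _ _ hj, List.getD_eq_getElem _ _ hi]; omega⟩
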